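-- pv_equiv track=rewrite | github.com/happyfuckingai/felicias-finance-hackathon | adk_agents/agents/coordinator_agent.py | _calculate_overall_team_status
-- ===== SOURCE A (Python) =====
-- from typing import Dict, List, Optional, Any
--
-- def _calculate_overall_team_status(team_status: Dict[str, Any]) -> str:
--     """Calculate overall team status"""
--     statuses = [status.get("status", "unknown") for status in team_status.values()]
--
--     if all(s == "active" for s in statuses):
--         return "fully_operational"
--     elif any(s == "error" for s in statuses):
--         return "degraded"
--     elif any(s == "busy" for s in statuses):
--         return "active"
--     else:
--         return "standby"
-- ===== SOURCE B (Python) =====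
-- from typing import Dict, List, Optional, Any
--
-- def _calculate_overall_team_status(team_status: Dict[str, Any]) -> str:
--     """Calculate overall team status as the worst severity over a small lattice:
--     active=0 < unknown/other=1 < busy=2 < error=3; the overall name is a table
--     lookup on the maximum severity (empty team -> 0 -> fully_operational)."""
--     severity = {"active": 0, "busy": 2, "error": 3}
--     worst = 0
--     for member in team_status.values():
--         worst = max(worst, severity.get(member.get("status", "unknown"), 1))
--     return ["fully_operational", "standby", "active", "degraded"][worst]
-- ===== Notes on version B (the rewrite author's own statement) =====
-- stated objective: alternative
-- what changed: Replaces A's cascade of all/any boolean predicates over a materialized statuses list by a worst-severity reduction: each status is mapped to a numeric severity (active=0, other=1, busy=2, error=3), a single max-fold computes the worst one, and the overall name is a table lookup on that maximum.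
import Mathlib
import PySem

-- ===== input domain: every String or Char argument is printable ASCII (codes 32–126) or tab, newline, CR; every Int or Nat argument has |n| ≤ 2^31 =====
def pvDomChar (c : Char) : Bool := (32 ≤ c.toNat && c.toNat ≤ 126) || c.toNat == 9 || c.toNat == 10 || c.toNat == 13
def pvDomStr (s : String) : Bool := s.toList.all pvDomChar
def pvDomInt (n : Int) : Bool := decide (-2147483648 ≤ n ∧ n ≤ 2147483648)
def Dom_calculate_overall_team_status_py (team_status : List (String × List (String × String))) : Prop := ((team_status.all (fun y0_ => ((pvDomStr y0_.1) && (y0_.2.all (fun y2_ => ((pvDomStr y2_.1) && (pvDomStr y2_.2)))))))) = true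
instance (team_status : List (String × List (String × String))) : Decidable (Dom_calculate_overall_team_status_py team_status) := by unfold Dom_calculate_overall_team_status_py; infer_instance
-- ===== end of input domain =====

-- B replaces A's cascade of all/any predicates over a statuses list by a worst-severity
-- max-reduction (active=0 < other=1 < busy=2 < error=3) with a table lookup at the end.

-- ===== PORT A =====
def calculate_overall_team_status_py (team_status : List (String × List (String × String))) : String :=
  let statuses := team_status.map (fun p => (PySem.Dict.ofList p.2).getD "status" "unknown")
  if statuses.all (fun s => s == "active") then "fully_operational"
  else if statuses.any (fun s => s == "error") then "degraded"
  else if statuses.any (fun s => s == "busy") then "active"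
  else "standby"

-- ===== PORT B =====
def calculate_overall_team_status_py_alt (team_status : List (String × List (String × String))) : String :=
  let severity : PySem.Dict String Int := PySem.Dict.ofList [("active", 0), ("busy", 2), ("error", 3)]
  let worst : Int := team_status.foldl
    (fun w p => max w (severity.getD ((PySem.Dict.ofList p.2).getD "status" "unknown") 1)) 0
  -- worst is always in [0, 3], so the Python list index never raises; the default "" is unreachable
  (PySem.List.pyGet? ["fully_operational", "standby", "active", "degraded"] worst).getD ""

-- ===== PRECONDITION & SPEC =====
def Spec_calculate_overall_team_status_py (team_status : List (String × List (String × String))) (out : String) : Prop := out = calculate_overall_team_status_py_alt team_status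
instance (team_status : List (String × List (String × String))) (out : String) : Decidable (Spec_calculate_overall_team_status_py team_status out) := by unfold Spec_calculate_overall_team_status_py; infer_instance

-- ===== CLAIM =====
def Claim_equal_calculate_overall_team_status_py : Prop := ∀ (team_status : List (String × List (String × String))), Dom_calculate_overall_team_status_py team_status → Spec_calculate_overall_team_status_py team_status (calculate_overall_team_status_py team_status)

-- ===== LEMMAS AND PROOFS =====

-- severity of one status string, exactly as B's dict lookup computes it
def pvSev (s : String) : Int :=
  (PySem.Dict.ofList [("active", (0:Int)), ("busy", 2), ("error", 3)]).getD s 1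

theorem pvSev_eq (s : String) :
    pvSev s = if s == "active" then 0 else if s == "busy" then 2 else if s == "error" then 3 else 1 := by
  have h : (PySem.Dict.ofList [("active", (0:Int)), ("busy", 2), ("error", 3)])
      = PySem.Dict.mk [("active", 0), ("busy", 2), ("error", 3)] := by decide
  rw [pvSev, h, PySem.Dict.getD]
  simp only [PySem.Dict.get?_mk_cons]
  by_cases h1 : s = "active"
  · subst h1; simp
  · by_cases h2 : s = "busy"
    · subst h2; simp
    · by_cases h3 : s = "error"
      · subst h3; simp
      · have e1 : ("active" == s) = false := by simpa [beq_iff_eq] using fun h => h1 h.symm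
        have e2 : ("busy" == s) = false := by simpa [beq_iff_eq] using fun h => h2 h.symm
        have e3 : ("error" == s) = false := by simpa [beq_iff_eq] using fun h => h3 h.symm
        simp [e1, e2, e3, h1, h2, h3, PySem.Dict.get?]

-- the worst severity of a list of statuses, characterized by any/all scans
theorem worst_char (xs : List String) (w : Int) (hw : 0 ≤ w) :
    xs.foldl (fun w s => max w (pvSev s)) w =
      max w (if xs.any (fun s => s == "error") then 3
             else if xs.any (fun s => s == "busy") then 2
             else if xs.all (fun s => s == "active") then 0 else 1) := by
  induction xs generalizing w with
  | nil => simp; omega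
  | cons h t ih =>
    simp only [List.foldl_cons]
    rw [ih (max w (pvSev h)) (le_trans hw (le_max_left _ _))]
    simp only [List.any_cons, List.all_cons, pvSev_eq]
    by_cases he : h = "error"
    · subst he; simp; split_ifs <;> omega
    · by_cases hb : h = "busy"
      · subst hb; simp; split_ifs <;> omega
      · by_cases ha : h = "active"
        · subst ha; simp; split_ifs <;> omega
        · simp [he, hb, ha]; split_ifs <;> omega

theorem fold_over_map (ts : List (String × List (String × String))) :
    ts.foldl (fun (w : Int) p => max w (pvSev ((PySem.Dict.ofList p.2).getD "status" "unknown"))) 0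
      = (ts.map (fun p => (PySem.Dict.ofList p.2).getD "status" "unknown")).foldl
          (fun w s => max w (pvSev s)) 0 := by
  rw [List.foldl_map]

theorem calculate_overall_team_status_py_spec : Claim_equal_calculate_overall_team_status_py := by
  intro ts _
  unfold Spec_calculate_overall_team_status_py calculate_overall_team_status_py
    calculate_overall_team_status_py_alt
  simp only [← pvSev.eq_def]
  rw [fold_over_map, worst_char _ 0 le_rfl]
  set xs := ts.map (fun p => (PySem.Dict.ofList p.2).getD "status" "unknown") with hxs
  by_cases he : xs.any (fun s => s == "error")
  · have hna : xs.all (fun s => s == "active") = false := by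
      rcases List.any_eq_true.mp he with ⟨x, hx, hxe⟩
      exact List.all_eq_false.mpr ⟨x, hx, by simp_all⟩
    simp [he, hna]
  · by_cases hb : xs.any (fun s => s == "busy")
    · have hna : xs.all (fun s => s == "active") = false := by
        rcases List.any_eq_true.mp hb with ⟨x, hx, hxe⟩
        exact List.all_eq_false.mpr ⟨x, hx, by simp_all⟩
      simp [he, hb, hna]
    · by_cases ha : xs.all (fun s => s == "active") <;> simp [he, hb, ha]
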